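-- pv_equiv track=rewrite | github.com/mehiskasonen/iti0102-2022 | EXAM/exam0/exam.py | get_names_from_results
-- ===== SOURCE A (Python) =====
-- def get_names_from_results(results_string: str, min_result: int) -> list:
--     """
--     Given a string of names and scores, return a list of names where the score is higher than or equal to min_result.
--
--     #3
--
--     Results are separated by comma (,). Result contains a score and optionally a name.
--     Score is integer, name can have several names separated by single space.
--     Name part can also contain numbers and other symbols (except for comma).
--     Return only the names which have the score higher or equal than min_result.
--     The order of the result should be the same as in input string.
--
--     get_names_from_results("ago 123,peeter 11", 0) => ["ago", "peeter"]
--     get_names_from_results("ago 123,peeter 11,33", 10) => ["ago", "peeter"]  # 33 does not have the name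
--     get_names_from_results("ago 123,peeter 11", 100) => ["ago"]
--     get_names_from_results("ago 123,peeter 11,kitty11!! 33", 11) => ["ago", "peeter",  "kitty11!!"]
--     get_names_from_results("ago 123,peeter 11,kusti riin 14", 12) => ["ago", "kusti riin"]
--     """
--     output = []
--     results_string = results_string.split(",")
--     results_string = [result.split(" ") for result in results_string if len(result.split(" ")) > 1]
--     for lst in results_string:
--         lst[-1] = int(lst[-1])
--     for result in results_string:
--         if result[-1] >= min_result:
--             output.append(result[0:-1])
--     output = [" ".join(x) for x in output]
--     return output
-- ===== SOURCE B (Python) =====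
-- def get_names_from_results(results_string: str, min_result: int) -> list:
--     """One character-level pass per entry: no split(" ")/join round-trip."""
--     output = []
--     for entry in results_string.split(','):
--         name = None
--         tail = ''
--         for ch in entry:
--             if ch == ' ':
--                 name = tail if name is None else name + ' ' + tail
--                 tail = ''
--             else:
--                 tail += ch
--         if name is not None and int(tail) >= min_result:
--             output.append(name)
--     return output
-- ===== Notes on version B (the rewrite author's own statement) =====
-- stated objective: alternative
-- what changed: A makes four passes building intermediate token lists (split by comma, split each entry by space, mutate last element to int, filter, join names back); B replaces the whole inner split/join pipeline with a single character-level scan per entry that accumulates the name up to the last space and the score after it.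
import Mathlib
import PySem

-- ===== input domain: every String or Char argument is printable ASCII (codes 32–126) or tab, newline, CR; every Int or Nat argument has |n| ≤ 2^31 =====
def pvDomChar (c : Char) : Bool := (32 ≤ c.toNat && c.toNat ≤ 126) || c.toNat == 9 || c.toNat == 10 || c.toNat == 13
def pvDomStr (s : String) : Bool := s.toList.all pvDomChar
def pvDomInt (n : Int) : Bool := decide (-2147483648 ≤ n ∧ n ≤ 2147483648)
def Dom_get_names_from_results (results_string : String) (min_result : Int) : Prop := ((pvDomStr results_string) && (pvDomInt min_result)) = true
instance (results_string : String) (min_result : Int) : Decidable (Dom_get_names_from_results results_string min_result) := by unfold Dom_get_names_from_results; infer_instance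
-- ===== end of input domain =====

-- B replaces A's four-pass split/join token pipeline by a single character-level scan per entry; alternative decomposition, same cost.
-- Pre_ excludes exactly the inputs where Python A raises ValueError (int() on a non-integer last token); both Pythons raise there.


-- ===== PORT A =====
-- Literal port of A. Python's in-place `lst[-1] = int(lst[-1])` turns the last element of a
-- heterogeneous list into an int; ported as the pair (token list, int of its last element), so that
-- `result[-1]` is the pair's int and `result[0:-1]` is the slice of the token list.
-- `int(x)` is PySem.Int.ofChars?; Pre_ excludes the inputs where it is none (Python ValueError).
def get_names_from_results (results_string : String) (min_result : Int) : List String :=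
  -- results_string = results_string.split(",")
  let parts : List String := (PySem.Str.split? results_string ",").getD []
  -- [result.split(" ") for result in results_string if len(result.split(" ")) > 1]
  let rs1 : List (List (List Char)) :=
    (parts.filter (fun r => 1 < (PySem.Chars.splitOn r.toList [' ']).length)).map
      (fun r => PySem.Chars.splitOn r.toList [' '])
  -- for lst in results_string: lst[-1] = int(lst[-1])
  let rs2 : List (List (List Char) × Int) :=
    rs1.map (fun toks => (toks, (PySem.Int.ofChars? (toks.getLastD [])).getD 0))
  -- for result in results_string: if result[-1] >= min_result: output.append(result[0:-1])
  let output : List (List (List Char)) :=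
    rs2.foldl (fun out p =>
      if min_result ≤ p.2 then out ++ [PySem.List.slice p.1 (some 0) (some (-1))] else out) []
  -- output = [" ".join(x) for x in output]
  output.map (fun x => String.ofList (PySem.Chars.join [' '] x))

-- ===== PORT B =====
-- B's inner loop body: on a space, fold the current tail into the name; otherwise extend the tail.
def pvScanStep (st : Option (List Char) × List Char) (ch : Char) : Option (List Char) × List Char :=
  if ch = ' ' then
    (some (match st.1 with | none => st.2 | some n => n ++ ' ' :: st.2), [])
  else (st.1, st.2 ++ [ch])

def get_names_from_results_alt (results_string : String) (min_result : Int) : List String :=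
  ((PySem.Str.split? results_string ",").getD []).foldl
    (fun out entry =>
      let st := entry.toList.foldl pvScanStep (none, [])
      match st.1 with
      | none => out
      | some n =>
        if min_result ≤ (PySem.Int.ofChars? st.2).getD 0 then out ++ [String.ofList n] else out)
    []

-- ===== PRECONDITION & SPEC =====
-- Pre_ excludes exactly the inputs where Python A raises ValueError: some comma-entry that
-- contains a space has a last space-token that int() cannot parse (B raises there too).
def Pre_get_names_from_results (results_string : String) (min_result : Int) : Prop :=
  ∀ r ∈ (PySem.Str.split? results_string ",").getD [],
    1 < (PySem.Chars.splitOn r.toList [' ']).length →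
    (PySem.Int.ofChars? ((PySem.Chars.splitOn r.toList [' ']).getLastD [])).isSome = true
instance (results_string : String) (min_result : Int) : Decidable (Pre_get_names_from_results results_string min_result) := by unfold Pre_get_names_from_results; infer_instance

def pvWitness_get_names_from_results : String × Int := ("ago 123,peeter 11,33", 10)

def Spec_get_names_from_results (results_string : String) (min_result : Int) (out : List String) : Prop := out = get_names_from_results_alt results_string min_result
instance (results_string : String) (min_result : Int) (out : List String) : Decidable (Spec_get_names_from_results results_string min_result out) := by unfold Spec_get_names_from_results; infer_instance

-- ===== CLAIM (what is proved, stated in full; the proofs are below) =====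
def Claim_equal_get_names_from_results : Prop := ∀ (results_string : String) (min_result : Int), Dom_get_names_from_results results_string min_result → Pre_get_names_from_results results_string min_result → Spec_get_names_from_results results_string min_result (get_names_from_results results_string min_result)

-- ===== LEMMAS AND PROOFS =====

-- A structurally recursive reformulation of PySem.Chars.splitOn for a one-character separator.
def pvSp (c : Char) : List Char → List (List Char)
  | [] => [[]]
  | a :: rest => if a = c then [] :: pvSp c rest else (pvSp c rest).modifyHead (a :: ·)

theorem pvSp_ne_nil (c : Char) (l : List Char) : pvSp c l ≠ [] := by
  induction l with
  | nil => simp [pvSp]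
  | cons a rest ih =>
    simp only [pvSp]
    split
    · simp
    · cases h : pvSp c rest with
      | nil => exact absurd h ih
      | cons x xs => simp

theorem pvGo_spec (c : Char) : ∀ (fuel : Nat) (l cur : List Char) (hacc : List (List Char)),
    l.length < fuel →
    PySem.Chars.splitOn.go [c] fuel l cur hacc = hacc.reverse ++ (pvSp c l).modifyHead (cur.reverse ++ ·) := by
  intro fuel
  induction fuel with
  | zero => intro l cur hacc h; omega
  | succ fuel ih =>
    intro l cur hacc h
    cases l with
    | nil => simp [PySem.Chars.splitOn.go, pvSp]
    | cons a rest =>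
      simp only [PySem.Chars.splitOn.go]
      by_cases hca : c = a
      · subst hca
        have hpre : [c].isPrefixOf (c :: rest) = true := by simp [List.isPrefixOf]
        rw [if_pos hpre]
        simp only [List.length_cons] at h
        have : List.drop [c].length (c :: rest) = rest := by simp
        rw [this, ih rest [] (cur.reverse :: hacc) (by omega)]
        cases hsp : pvSp c rest <;> simp [pvSp, hsp]
      · have hpre : [c].isPrefixOf (a :: rest) = true → False := by
          simp [List.isPrefixOf]; intro hh; exact hca hh
        rw [if_neg (by intro hh; exact hpre hh)]
        simp only [List.length_cons] at h
        rw [ih rest (a :: cur) hacc (by omega)]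
        have hne := pvSp_ne_nil c rest
        cases hsp : pvSp c rest with
        | nil => exact absurd hsp hne
        | cons x xs =>
          have hac : ¬ (a = c) := fun hh => hca hh.symm
          simp [pvSp, hsp, hac]

theorem pvSplitOn_eq (c : Char) (l : List Char) :
    PySem.Chars.splitOn l [c] = pvSp c l := by
  unfold PySem.Chars.splitOn
  rw [pvGo_spec c (l.length + 1) l [] [] (by omega)]
  cases hsp : pvSp c l with
  | nil => exact absurd hsp (pvSp_ne_nil c l)
  | cons x xs => simp

-- " ".join as a left fold over the remaining pieces.
theorem pvJoin_foldl (c : Char) (x : List Char) (ys : List (List Char)) :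
    PySem.Chars.join [c] (x :: ys) = ys.foldl (fun a y => a ++ c :: y) x := by
  induction ys generalizing x with
  | nil => simp [PySem.Chars.join, List.intercalate]
  | cons y ys ih =>
    rw [List.foldl_cons, ← ih (x ++ c :: y)]
    simp only [PySem.Chars.join, List.intercalate] at *
    cases ys <;> simp [List.intersperse]

-- simp normalises `slice l (some 0) b` to `slice l none b`, hence the `none` form.
theorem pvSlice_dropLast' (l : List (List Char)) :
    PySem.List.slice l none (some (-1)) = l.dropLast := by
  simp [PySem.List.slice, List.dropLast_eq_take]

-- What B's character scan computes, in terms of pvSp.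
theorem pvScan_spec : ∀ (cs : List Char) (n? : Option (List Char)) (t : List Char)
    (x : List Char) (xs : List (List Char)), pvSp ' ' cs = x :: xs →
    cs.foldl pvScanStep (n?, t) =
      (match xs with
       | [] => (n?, t ++ x)
       | _ :: _ =>
         (some (xs.dropLast.foldl (fun a y => a ++ ' ' :: y)
            (match n? with | none => t ++ x | some n => n ++ ' ' :: (t ++ x))),
          xs.getLastD [])) := by
  intro cs
  induction cs with
  | nil =>
    intro n? t x xs hsp
    simp [pvSp] at hsp
    obtain ⟨hx, hxs⟩ := hsp
    subst hx; subst hxs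
    simp
  | cons a rest ih =>
    intro n? t x xs hsp
    by_cases ha : a = ' '
    · subst ha
      simp only [pvSp, if_pos] at hsp
      obtain ⟨hx, hxs⟩ := List.cons.inj hsp
      subst hx
      rw [List.foldl_cons]
      have hstep : pvScanStep (n?, t) ' ' = (some (match n? with | none => t | some n => n ++ ' ' :: t), []) := by
        simp [pvScanStep]
      rw [hstep]
      cases hsp' : pvSp ' ' rest with
      | nil => exact absurd hsp' (pvSp_ne_nil _ _)
      | cons x' xs' =>
        have hxs' : xs = x' :: xs' := by rw [← hxs, hsp']
        subst hxs'
        rw [ih _ [] x' xs' hsp']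
        cases xs' with
        | nil => cases n? <;> simp
        | cons y ys =>
          have hdl : (x' :: y :: ys).dropLast = x' :: (y :: ys).dropLast := rfl
          cases n? <;> simp [hdl, List.foldl_cons]
    · simp only [pvSp, if_neg ha] at hsp
      cases hsp' : pvSp ' ' rest with
      | nil => exact absurd hsp' (pvSp_ne_nil _ _)
      | cons x' xs' =>
        rw [hsp'] at hsp
        simp only [List.modifyHead] at hsp
        obtain ⟨hx, hxs⟩ := List.cons.inj hsp
        rw [List.foldl_cons]
        have hstep : pvScanStep (n?, t) a = (n?, t ++ [a]) := by simp [pvScanStep, ha]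
        rw [hstep, ih _ (t ++ [a]) x' xs' hsp']
        subst hx
        subst hxs
        cases xs' <;> simp

-- Per-entry value of A's pipeline.
def pvFA (m : Int) (r : String) : List String :=
  let toks := PySem.Chars.splitOn r.toList [' ']
  if 1 < toks.length then
    if m ≤ (PySem.Int.ofChars? (toks.getLastD [])).getD 0 then
      [String.ofList (PySem.Chars.join [' '] toks.dropLast)]
    else []
  else []

-- Per-entry value of B's loop body.
def pvFB (m : Int) (r : String) : List String :=
  let st := r.toList.foldl pvScanStep (none, [])
  match st.1 with
  | none => []
  | some n => if m ≤ (PySem.Int.ofChars? st.2).getD 0 then [String.ofList n] else []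

theorem pvA_flatMap (s : String) (m : Int) :
    get_names_from_results s m = ((PySem.Str.split? s ",").getD []).flatMap (pvFA m) := by
  unfold get_names_from_results
  generalize (PySem.Str.split? s ",").getD [] = parts
  have hf : (fun (out : List (List (List Char))) (p : List (List Char) × Int) =>
      if m ≤ p.2 then out ++ [PySem.List.slice p.1 (some 0) (some (-1))] else out)
      = (fun out p => out ++ (if m ≤ p.2 then [PySem.List.slice p.1 (some 0) (some (-1))] else [])) := by
    funext out p; split <;> simp
  simp only [hf, PySem.List.foldl_append_eq_flatMap, List.nil_append]
  induction parts with
  | nil => simp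
  | cons r parts ih =>
    simp only [List.filter_cons]
    by_cases hp : 1 < (PySem.Chars.splitOn r.toList [' ']).length
    · have hd : decide (1 < (PySem.Chars.splitOn r.toList [' ']).length) = true := decide_eq_true hp
      simp only [hd, if_true, List.map_cons, List.flatMap_cons, List.map_append, ih]
      congr 1
      simp only [pvFA]
      rw [if_pos hp]
      split <;> simp [pvSlice_dropLast']
    · have hd : decide (1 < (PySem.Chars.splitOn r.toList [' ']).length) = false := decide_eq_false hp
      simp only [hd, Bool.false_eq_true, if_false, List.flatMap_cons, pvFA]
      rw [if_neg hp]
      simpa using ih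

theorem pvB_flatMap (s : String) (m : Int) :
    get_names_from_results_alt s m = ((PySem.Str.split? s ",").getD []).flatMap (pvFB m) := by
  unfold get_names_from_results_alt
  have hf : (fun (out : List String) (entry : String) =>
      let st := entry.toList.foldl pvScanStep (none, [])
      match st.1 with
      | none => out
      | some n =>
        if m ≤ (PySem.Int.ofChars? st.2).getD 0 then out ++ [String.ofList n] else out)
      = (fun out entry => out ++ pvFB m entry) := by
    funext out entry
    simp only [pvFB]
    cases (entry.toList.foldl pvScanStep (none, [])).1 with
    | none => exact (List.append_nil out).symm
    | some n => split_ifs <;> simp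
  rw [hf, PySem.List.foldl_append_eq_flatMap]
  simp

theorem pvEntry_eq (m : Int) (r : String) : pvFA m r = pvFB m r := by
  simp only [pvFA, pvFB, pvSplitOn_eq]
  cases hsp : pvSp ' ' r.toList with
  | nil => exact absurd hsp (pvSp_ne_nil _ _)
  | cons x xs =>
    rw [pvScan_spec r.toList none [] x xs hsp]
    cases xs with
    | nil => simp
    | cons y ys =>
      have h1 : 1 < (x :: y :: ys).length := by simp
      rw [if_pos h1]
      have hdl : (x :: y :: ys).dropLast = x :: (y :: ys).dropLast := rfl
      have hlast : (x :: y :: ys).getLastD [] = (y :: ys).getLastD [] := by simp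
      rw [hdl, pvJoin_foldl]
      simp

-- ===== VERDICT (by name: the statement is the Claim_ definition above) =====
theorem get_names_from_results_spec : Claim_equal_get_names_from_results := by
  intro s m _ _
  unfold Spec_get_names_from_results
  rw [pvA_flatMap, pvB_flatMap]
  exact congrArg (fun f => List.flatMap f ((PySem.Str.split? s ",").getD [])) (funext (fun r => pvEntry_eq m r))
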